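-- pv_equiv track=rewrite | github.com/MuhammadHammad-QA/Project | 11610/random/test.py | merge_sect
-- ===== SOURCE A (Python) =====
-- def merge_sect(parsed_groups):
--     # Define group mappings
--     groups = {
--         'group1': {'gpu', 'machine_name', 'design_size'},
--         'group2': {'high_curvature_internal_checking_count', 'mrc_area_count'},
--         'group3': {'mean_fermi'},
--         'group4': {'target_prep_runtime'}
--     }
--
--     # Initialize result dictionary
--     result_dict = {group: [] for group in groups}
--
--     # Process parsed_groups
--     for item in parsed_groups:
--         lines = item.split('\n')
--         if not lines:
--             continue
--
--         first_line = lines[0]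
--         key = first_line.split(' = ', 1)[0]
--         remaining_lines = '\n'.join(lines[1:])
--
--         # Append to the appropriate group
--         for group, keys in groups.items():
--             if key in keys:
--                 result_dict[group].append(first_line + '\n' + remaining_lines)
--                 break
--
--     # Collect results and apply swaps
--     output_list = [ '\n'.join(result_dict.get(group, [])) for group in ['group1', 'group2', 'group3', 'group4'] ]
--
--     # Swap the specified elements
--     output_list[1], output_list[3] = output_list[3], output_list[1]
--     output_list[2], output_list[3] = output_list[3], output_list[2]
--
--     return output_list
-- ===== SOURCE B (Python) =====
-- def merge_sect(parsed_groups):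
--     # Iterate groups directly in the final output order; no dict, no swap step.
--     groups_in_order = [
--         ('group1', {'gpu', 'machine_name', 'design_size'}),
--         ('group4', {'target_prep_runtime'}),
--         ('group2', {'high_curvature_internal_checking_count', 'mrc_area_count'}),
--         ('group3', {'mean_fermi'}),
--     ]
--     out = []
--     for _name, keys in groups_in_order:
--         bucket = []
--         for item in parsed_groups:
--             lines = item.split('\n')
--             if lines[0].split(' = ', 1)[0] in keys:
--                 bucket.append(lines[0] + '\n' + '\n'.join(lines[1:]))
--         out.append('\n'.join(bucket))
--     return out
-- ===== Notes on version B (the rewrite author's own statement) =====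
-- stated objective: simpler
-- what changed: Inverted the loop nesting: B iterates over the four groups in their final output order and for each does one scan of parsed_groups collecting matching items, eliminating A's result dict, the inner break-loop over groups, and the two index-swap steps.
import Mathlib
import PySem

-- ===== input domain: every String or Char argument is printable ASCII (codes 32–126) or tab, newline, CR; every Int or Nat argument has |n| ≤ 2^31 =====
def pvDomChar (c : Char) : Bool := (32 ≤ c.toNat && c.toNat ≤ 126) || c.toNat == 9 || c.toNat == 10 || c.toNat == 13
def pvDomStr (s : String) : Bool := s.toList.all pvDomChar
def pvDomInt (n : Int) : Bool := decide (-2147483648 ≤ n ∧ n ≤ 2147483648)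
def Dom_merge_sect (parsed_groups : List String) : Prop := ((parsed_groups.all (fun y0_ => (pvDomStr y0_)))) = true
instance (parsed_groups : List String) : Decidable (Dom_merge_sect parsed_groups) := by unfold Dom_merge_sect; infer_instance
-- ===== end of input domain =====

-- B inverts the loop nesting: it visits the four groups in final output order and scans
-- parsed_groups once per group, removing A's result dict, break-loop and index swaps (objective: simpler).

-- ===== PORT A =====
def pvGroupsA : List (String × PySem.Set String) :=
  [("group1", PySem.Set.ofList ["gpu", "machine_name", "design_size"]),
   ("group2", PySem.Set.ofList ["high_curvature_internal_checking_count", "mrc_area_count"]),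
   ("group3", PySem.Set.ofList ["mean_fermi"]),
   ("group4", PySem.Set.ofList ["target_prep_runtime"])]

-- 'for group, keys in groups.items(): if key in keys: result_dict[group].append(x); break'
def pvAppendFirstMatch (key x : String) : List (String × PySem.Set String) → PySem.Dict String (List String) → PySem.Dict String (List String)
  | [], d => d
  | (g, ks) :: rest, d => if key ∈ ks then d.modify g [] (· ++ [x]) else pvAppendFirstMatch key x rest d

def merge_sect (parsed_groups : List String) : List String :=
  let result_dict : PySem.Dict String (List String) :=
    PySem.Dict.ofList [("group1", []), ("group2", []), ("group3", []), ("group4", [])]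
  let result_dict := parsed_groups.foldl (fun d item =>
    let lines := (PySem.Str.split? item "\n").getD []   -- split? is some: sep ≠ ""
    if lines = [] then d else
      let first_line := lines.headD ""                  -- lines[0], guarded above
      let key := ((PySem.Str.splitMax? first_line " = " 1).getD []).headD ""  -- split(' = ',1)[0]; split is some and nonempty
      let remaining_lines := PySem.Str.join "\n" lines.tail
      pvAppendFirstMatch key (first_line ++ "\n" ++ remaining_lines) pvGroupsA d) result_dict
  let output_list := ["group1", "group2", "group3", "group4"].map (fun g => PySem.Str.join "\n" (result_dict.getD g []))
  -- output_list[1], output_list[3] = output_list[3], output_list[1]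
  let output_list := (output_list.set 1 (output_list.getD 3 "")).set 3 (output_list.getD 1 "")
  -- output_list[2], output_list[3] = output_list[3], output_list[2]
  let output_list := (output_list.set 2 (output_list.getD 3 "")).set 3 (output_list.getD 2 "")
  output_list

-- ===== PORT B =====
def pvGroupsB : List (String × PySem.Set String) :=
  [("group1", PySem.Set.ofList ["gpu", "machine_name", "design_size"]),
   ("group4", PySem.Set.ofList ["target_prep_runtime"]),
   ("group2", PySem.Set.ofList ["high_curvature_internal_checking_count", "mrc_area_count"]),
   ("group3", PySem.Set.ofList ["mean_fermi"])]

def merge_sect_alt (parsed_groups : List String) : List String :=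
  pvGroupsB.foldl (fun out gp =>
    let bucket := parsed_groups.foldl (fun b item =>
      let lines := (PySem.Str.split? item "\n").getD []   -- split? is some: sep ≠ ""
      if ((PySem.Str.splitMax? (lines.headD "") " = " 1).getD []).headD "" ∈ gp.2 then
        b ++ [lines.headD "" ++ "\n" ++ PySem.Str.join "\n" lines.tail]
      else b) []
    out ++ [PySem.Str.join "\n" bucket]) []

-- ===== PRECONDITION & SPEC =====
def Spec_merge_sect (parsed_groups : List String) (out : List String) : Prop := out = merge_sect_alt parsed_groups
instance (parsed_groups : List String) (out : List String) : Decidable (Spec_merge_sect parsed_groups out) := by unfold Spec_merge_sect; infer_instance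

-- ===== CLAIM (what is proved, stated in full; the proofs are below) =====
def Claim_equal_merge_sect : Prop := ∀ (parsed_groups : List String), Dom_merge_sect parsed_groups → Spec_merge_sect parsed_groups (merge_sect parsed_groups)

-- ===== LEMMAS AND PROOFS =====

-- the key and reconstructed string of one item
def pvKey (item : String) : String :=
  ((PySem.Str.splitMax? (((PySem.Str.split? item "\n").getD []).headD "") " = " 1).getD []).headD ""

def pvRec (item : String) : String :=
  ((PySem.Str.split? item "\n").getD []).headD "" ++ "\n"
    ++ PySem.Str.join "\n" ((PySem.Str.split? item "\n").getD []).tail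

-- the bucket one group collects
def pvBkt (s : PySem.Set String) (l : List String) : List String :=
  (l.filter (fun it => decide (pvKey it ∈ s))).map pvRec

-- B's inner scan collects exactly the bucket
theorem pvBkt_cons (s : PySem.Set String) (x : String) (xs : List String) :
    pvBkt s (x :: xs) = (if pvKey x ∈ s then [pvRec x] else []) ++ pvBkt s xs := by
  simp only [pvBkt, List.filter_cons]
  split_ifs with h <;> simp_all

-- B's inner scan collects exactly the bucket
theorem pvBkt_foldl (s : PySem.Set String) (l : List String) (acc : List String) :
    l.foldl (fun b item =>
      let lines := (PySem.Str.split? item "\n").getD []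
      if ((PySem.Str.splitMax? (lines.headD "") " = " 1).getD []).headD "" ∈ s then
        b ++ [lines.headD "" ++ "\n" ++ PySem.Str.join "\n" lines.tail]
      else b) acc
    = acc ++ pvBkt s l := by
  induction l generalizing acc with
  | nil => simp [pvBkt]
  | cons x xs ih =>
    simp only [List.foldl_cons, ih, pvBkt_cons]
    by_cases h : pvKey x ∈ s
    · rw [if_pos (by simpa [pvKey] using h)]
      simp [pvRec, h, List.append_assoc]
    · rw [if_neg (by simpa [pvKey] using h)]
      simp [h]

-- one item is appended to the bucket of the first — by disjointness, the only — group containing its key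
theorem pvStep (k x : String) (a1 a2 a3 a4 : List String) :
    pvAppendFirstMatch k x pvGroupsA (PySem.Dict.mk [("group1", a1), ("group2", a2), ("group3", a3), ("group4", a4)])
    = PySem.Dict.mk [("group1", if k ∈ PySem.Set.ofList ["gpu", "machine_name", "design_size"] then a1 ++ [x] else a1),
                     ("group2", if k ∈ PySem.Set.ofList ["high_curvature_internal_checking_count", "mrc_area_count"] then a2 ++ [x] else a2),
                     ("group3", if k ∈ PySem.Set.ofList ["mean_fermi"] then a3 ++ [x] else a3),
                     ("group4", if k ∈ PySem.Set.ofList ["target_prep_runtime"] then a4 ++ [x] else a4)] := by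
  by_cases h1 : k ∈ PySem.Set.ofList ["gpu", "machine_name", "design_size"]
  · have hk : k = "gpu" ∨ k = "machine_name" ∨ k = "design_size" := by
      simpa [PySem.Set.mem_ofList] using h1
    rcases hk with rfl | rfl | rfl <;>
      simp [pvAppendFirstMatch, pvGroupsA, PySem.Dict.modify, PySem.Dict.insert,
        PySem.Dict.getD, PySem.Dict.get?, PySem.Dict.contains, PySem.Set.mem_ofList]
  · by_cases h2 : k ∈ PySem.Set.ofList ["high_curvature_internal_checking_count", "mrc_area_count"]
    · have hk : k = "high_curvature_internal_checking_count" ∨ k = "mrc_area_count" := by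
        simpa [PySem.Set.mem_ofList] using h2
      rcases hk with rfl | rfl <;>
        simp [pvAppendFirstMatch, pvGroupsA, PySem.Dict.modify, PySem.Dict.insert,
          PySem.Dict.getD, PySem.Dict.get?, PySem.Dict.contains, PySem.Set.mem_ofList]
    · by_cases h3 : k ∈ PySem.Set.ofList ["mean_fermi"]
      · have hk : k = "mean_fermi" := by simpa [PySem.Set.mem_ofList] using h3
        subst hk
        simp [pvAppendFirstMatch, pvGroupsA, PySem.Dict.modify, PySem.Dict.insert,
          PySem.Dict.getD, PySem.Dict.get?, PySem.Dict.contains, PySem.Set.mem_ofList]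
      · by_cases h4 : k ∈ PySem.Set.ofList ["target_prep_runtime"]
        · have hk : k = "target_prep_runtime" := by simpa [PySem.Set.mem_ofList] using h4
          subst hk
          simp [pvAppendFirstMatch, pvGroupsA, PySem.Dict.modify, PySem.Dict.insert,
            PySem.Dict.getD, PySem.Dict.get?, PySem.Dict.contains, PySem.Set.mem_ofList]
        · simp [pvAppendFirstMatch, pvGroupsA, h1, h2, h3, h4]

-- A's fold over items maintains the four buckets
theorem pvFoldA (l : List String) (a1 a2 a3 a4 : List String) :
    l.foldl (fun d item =>
      let lines := (PySem.Str.split? item "\n").getD []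
      if lines = [] then d else
        let first_line := lines.headD ""
        let key := ((PySem.Str.splitMax? first_line " = " 1).getD []).headD ""
        let remaining_lines := PySem.Str.join "\n" lines.tail
        pvAppendFirstMatch key (first_line ++ "\n" ++ remaining_lines) pvGroupsA d)
      (PySem.Dict.mk [("group1", a1), ("group2", a2), ("group3", a3), ("group4", a4)])
    = PySem.Dict.mk [("group1", a1 ++ pvBkt (PySem.Set.ofList ["gpu", "machine_name", "design_size"]) l),
                     ("group2", a2 ++ pvBkt (PySem.Set.ofList ["high_curvature_internal_checking_count", "mrc_area_count"]) l),
                     ("group3", a3 ++ pvBkt (PySem.Set.ofList ["mean_fermi"]) l),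
                     ("group4", a4 ++ pvBkt (PySem.Set.ofList ["target_prep_runtime"]) l)] := by
  induction l generalizing a1 a2 a3 a4 with
  | nil => simp [pvBkt]
  | cons x xs ih =>
    simp only [List.foldl_cons]
    by_cases hx : (PySem.Str.split? x "\n").getD [] = ([] : List String)
    · rw [if_pos hx]
      have hk : pvKey x = "" := by unfold pvKey; rw [hx]; rfl
      rw [ih]
      simp [pvBkt_cons, hk, PySem.Set.mem_ofList]
    · rw [if_neg hx, pvStep, ih]
      simp only [← pvKey.eq_def, ← pvRec.eq_def]
      rw [pvBkt_cons, pvBkt_cons, pvBkt_cons, pvBkt_cons]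
      split_ifs <;> simp

-- ===== VERDICT (by name: the statement is the Claim_ definition above) =====
theorem merge_sect_spec : Claim_equal_merge_sect := by
  intro parsed_groups _
  unfold Spec_merge_sect
  have hof : PySem.Dict.ofList [("group1", ([] : List String)), ("group2", []), ("group3", []), ("group4", [])]
      = PySem.Dict.mk [("group1", []), ("group2", []), ("group3", []), ("group4", [])] := by decide
  simp only [merge_sect, merge_sect_alt]
  rw [hof, pvFoldA]
  simp only [pvGroupsB, List.foldl_cons, List.foldl_nil]
  rw [pvBkt_foldl, pvBkt_foldl, pvBkt_foldl, pvBkt_foldl]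
  simp [PySem.Dict.getD_eq_get?_getD, PySem.Dict.get?_mk_cons]
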